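-- pv_equiv track=rewrite | github.com/Jeecis/ProgrammingLanguageMidterm | prob3_Jēkabs_Čudars_231RDB342.py | full_alphabet_len
-- ===== SOURCE A (Python) =====
-- def full_alphabet_len(text: str, ignore_case: bool = True, custom_a: str = None) -> int:
--     # Helper function to get clean text (only alphabet characters)
--     def clean_text(s: str) -> str:
--         if ignore_case:
--             s = s.lower()
--         return ''.join(c for c in s if c.isalpha())
--
--     # Determine alphabet to use
--     if custom_a:
--         alphabet = set(custom_a)
--     else:
--         alphabet = set('abcdefghijklmnopqrstuvwxyz')
--     alphabet_size = len(alphabet)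
--
--     text = clean_text(text)
--     if not text:
--         return 0
--
--     # Sliding window approach
--     char_count = {}
--     complete_alphabets = 0
--     left = 0
--     min_length = float('inf')
--
--     for right in range(len(text)):
--         current_char = text[right]
--         # Add new character to count
--         # If current character is not in alphabet consider its default value to be zero and increment it by 1
--         char_count[current_char] = char_count.get(current_char, 0) + 1
--
--         # Check if we have a complete alphabet
--         # Count the number of unique characters in the current window that meet the complete_alphabet requirement
--         current_unique = 0
--         for c in alphabet:
--             if char_count.get(c, 0) >= 2:
--                 current_unique += 1
--
--         # Now we apply sliding window approach
--         # I knew that sliding window approach would be the right choice here but I didn't know how to implement it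
--         # So I asked Deepseek Distilled version from t3.chat and then implemented it
--         # Try to minimize window from left while maintaining two complete alphabets
--         while left <= right:
--             if current_unique == alphabet_size:
--                 # We have two complete alphabets, try to minimize
--                 # Check if all characters in the alphabet meet the complete_alphabet requirement
--                 all_chars_meet_requirement = True
--                 for c in alphabet:
--                     # If character count is less than complete_alphabet, break
--                     if char_count.get(c, 0) < 2:
--                         all_chars_meet_requirement = False
--                         break
--
--                 # If all characters meet the requirement, update the minimum length
--                 if all_chars_meet_requirement:
--                     min_length = min(min_length, right - left + 1)
--
--                 # Try to remove leftmost character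
--                 leftChar = text[left]
--                 char_count[leftChar] -= 1 # Remove 1 point from character from count
--
--                 # If character count is less than complete_alphabet and character is in alphabet, decrement current_unique
--                 if char_count[leftChar] < 2 and leftChar in alphabet:
--                     current_unique -= 1
--
--                 left += 1 #Adjust the left position
--             else:
--                 break
--
--     return min_length if min_length != float('inf') else -1
-- ===== SOURCE B (Python) =====
-- def full_alphabet_len(text: str, ignore_case: bool = True, custom_a: str = None) -> int:
--     # Occurrence-index method: the tightest window ending at r that contains every
--     # alphabet letter twice starts at the minimum, over the letters, of the
--     # second-to-last occurrence of that letter at or before r.  No window counts,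
--     # no shrinking left pointer.
--     if ignore_case:
--         text = text.lower()
--     s = [c for c in text if c.isalpha()]
--     if not s:
--         return 0
--     alphabet = set(custom_a) if custom_a else set('abcdefghijklmnopqrstuvwxyz')
--     last = {}         # letter -> index of its last occurrence so far
--     second_last = {}  # letter -> index of its second-to-last occurrence so far
--     best = None
--     for r, ch in enumerate(s):
--         if ch in alphabet:
--             if ch in last:
--                 second_last[ch] = last[ch]
--             last[ch] = r
--         if all(c in second_last for c in alphabet):
--             length = r - min(second_last[c] for c in alphabet) + 1
--             if best is None or length < best:
--                 best = length
--     return best if best is not None else -1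
-- ===== Notes on version B (the rewrite author's own statement) =====
-- stated objective: alternative
-- what changed: B drops the sliding window entirely: instead of window letter-counts and a shrinking left pointer, it records for each alphabet letter the index of its second-to-last occurrence and, at each position r, takes the window [min of those indices, r] directly as the tightest complete window ending at r.
import Mathlib
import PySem

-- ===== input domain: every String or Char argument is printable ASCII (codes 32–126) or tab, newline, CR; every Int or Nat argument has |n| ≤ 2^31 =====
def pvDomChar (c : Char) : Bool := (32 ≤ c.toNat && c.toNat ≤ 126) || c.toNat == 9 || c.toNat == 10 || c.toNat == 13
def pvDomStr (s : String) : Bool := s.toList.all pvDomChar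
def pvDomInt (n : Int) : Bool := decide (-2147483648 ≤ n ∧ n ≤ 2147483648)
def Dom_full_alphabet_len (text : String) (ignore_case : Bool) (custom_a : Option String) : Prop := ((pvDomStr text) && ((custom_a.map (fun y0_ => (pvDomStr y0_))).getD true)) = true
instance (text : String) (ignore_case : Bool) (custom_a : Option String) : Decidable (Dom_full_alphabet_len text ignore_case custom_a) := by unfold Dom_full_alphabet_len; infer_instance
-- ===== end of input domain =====

-- B replaces A's sliding window (window letter-counts plus a shrinking left pointer) by the
-- occurrence-index method: per letter the index of its second-to-last occurrence; the tightest
-- complete window ending at r starts at the minimum of those indices (objective: alternative).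

-- ===== PORT A =====
-- shared source text of both Pythons: clean_text (lower if ignore_case, keep alphabetic)
def pvClean (ignore_case : Bool) (s : List Char) : List Char :=
  (if ignore_case then PySem.Chars.lower s else s).filter PySem.Chars.isalpha

-- shared source text of both Pythons: set(custom_a) if custom_a else set('abc…z')
def pvAlphabet (custom_a : Option String) : PySem.Set Char :=
  match custom_a with
  | some ca => if ca.toList ≠ [] then PySem.Set.ofList ca.toList
               else PySem.Set.ofList "abcdefghijklmnopqrstuvwxyz".toList
  | none => PySem.Set.ofList "abcdefghijklmnopqrstuvwxyz".toList

-- A's inner while-loop (shrink from the left while the window is complete)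
def pvAShrink (s alpha : List Char) (right : Nat) (cc : PySem.Dict Char Int) (cu : Int)
    (left : Nat) (ml : Option Nat) : PySem.Dict Char Int × Nat × Option Nat :=
  if _h : left ≤ right then
    if cu = (alpha.length : Int) then
      -- the early-break scan `for c in alphabet: if … < 2: break` is List.all (order-independent)
      let allMeet := alpha.all (fun c => 2 ≤ cc.getD c 0)
      let ml' := if allMeet then
          some (match ml with
                | none => right - left + 1
                | some m => min m (right - left + 1))
        else ml
      let lc := s.getD left ' '   -- text[left]: always in range here, getD is exact
      let cc' := cc.modify lc 0 (· - 1)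
      let cu' := if cc'.getD lc 0 < 2 ∧ PySem.Set.contains alpha lc then cu - 1 else cu
      pvAShrink s alpha right cc' cu' (left + 1) ml'
    else (cc, left, ml)
  else (cc, left, ml)
  termination_by right + 1 - left
  decreasing_by omega

-- A's body of `for right in range(len(text))`
def pvAStep (s alpha : List Char) (st : PySem.Dict Char Int × Nat × Option Nat)
    (right : Nat) : PySem.Dict Char Int × Nat × Option Nat :=
  let (cc, left, ml) := st
  let ch := s.getD right ' '   -- text[right]: right < len, getD is exact
  let cc' := cc.modify ch 0 (· + 1)
  -- rescan of the whole alphabet (iteration over a set; a pure count, order-independent)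
  let cu := alpha.foldl (fun acc c => if 2 ≤ cc'.getD c 0 then acc + 1 else acc) (0 : Int)
  pvAShrink s alpha right cc' cu left ml

def full_alphabet_len (text : String) (ignore_case : Bool) (custom_a : Option String) : Int :=
  let alpha := pvAlphabet custom_a
  let s := pvClean ignore_case text.toList
  if s = [] then 0
  else
    let r := (List.range s.length).foldl (pvAStep s alpha) (PySem.Dict.empty, 0, none)
    match r.2.2 with
    | some m => (m : Int)   -- min_length (always an int when set)
    | none => -1            -- min_length == float('inf')

-- ===== PORT B =====
-- B's body of `for r, ch in enumerate(s)`
def pvBStep (alpha : List Char)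
    (st : PySem.Dict Char Int × PySem.Dict Char Int × Option Int)
    (p : Int × Char) : PySem.Dict Char Int × PySem.Dict Char Int × Option Int :=
  let (last, sl, best) := st
  let (r, ch) := p
  let ls := if PySem.Set.contains alpha ch then
      (last.insert ch r,
       match last.get? ch with   -- `if ch in last: second_last[ch] = last[ch]`
       | some v => sl.insert ch v
       | none => sl)
    else (last, sl)
  let best' := if alpha.all (fun c => (ls.2.get? c).isSome) then
      -- `min(second_last[c] for c in alphabet)`: the alphabet is nonempty, so min? is some;
      -- the lookups are exact (all keys present, so getD's default is never used)
      let m := (PySem.List.min? (alpha.map (fun c => ls.2.getD c 0)) (fun x => x)).getD 0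
      let len := r - m + 1
      match best with
      | none => some len
      | some b => if len < b then some len else some b
    else best
  (ls.1, ls.2, best')

def full_alphabet_len_alt (text : String) (ignore_case : Bool) (custom_a : Option String) : Int :=
  let s := pvClean ignore_case text.toList
  if s = [] then 0
  else
    let alpha := pvAlphabet custom_a
    let r := (PySem.List.enumerate s 0).foldl (pvBStep alpha)
      (PySem.Dict.empty, PySem.Dict.empty, none)
    match r.2.2 with
    | some b => b
    | none => -1

-- ===== PRECONDITION & SPEC =====
def Spec_full_alphabet_len (text : String) (ignore_case : Bool) (custom_a : Option String) (out : Int) : Prop := out = full_alphabet_len_alt text ignore_case custom_a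
instance (text : String) (ignore_case : Bool) (custom_a : Option String) (out : Int) : Decidable (Spec_full_alphabet_len text ignore_case custom_a out) := by unfold Spec_full_alphabet_len; infer_instance

-- ===== CLAIM (what is proved, stated in full; the proofs are below) =====
def Claim_equal_full_alphabet_len : Prop := ∀ (text : String) (ignore_case : Bool) (custom_a : Option String), Dom_full_alphabet_len text ignore_case custom_a → Spec_full_alphabet_len text ignore_case custom_a (full_alphabet_len text ignore_case custom_a)

-- ===== LEMMAS AND PROOFS =====

-- ghost: number of occurrences of c among the first n characters of s
def pvPc (s : List Char) (c : Char) : Nat → Nat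
  | 0 => 0
  | n + 1 => pvPc s c n + (if s.getD n ' ' = c then 1 else 0)

-- ghost: index of the last occurrence of c among the first n characters
def pvLastF (s : List Char) (c : Char) : Nat → Option Nat
  | 0 => none
  | n + 1 => if s.getD n ' ' = c then some n else pvLastF s c n

-- ghost: index of the second-to-last occurrence of c among the first n characters
def pvSlF (s : List Char) (c : Char) : Nat → Option Nat
  | 0 => none
  | n + 1 => if s.getD n ' ' = c then pvLastF s c n else pvSlF s c n

-- ghost: min over the alphabet of the second-to-last occurrence (none if some letter lacks two)
def pvMF (s alpha : List Char) (n : Nat) : Option Nat :=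
  if alpha.all (fun c => (pvSlF s c n).isSome) then
    (alpha.map (fun c => (pvSlF s c n).getD 0)).min?
  else none

-- ghost: the running best (minimal complete-window length over all right ends < n)
def pvBestF (s alpha : List Char) : Nat → Option Nat
  | 0 => none
  | n + 1 =>
      match pvMF s alpha (n + 1) with
      | none => pvBestF s alpha n
      | some v => some (match pvBestF s alpha n with
                        | none => n - v + 1
                        | some b => min b (n - v + 1))

lemma pvPc_mono (s : List Char) (c : Char) {L n : Nat} (h : L ≤ n) :
    pvPc s c L ≤ pvPc s c n := by
  induction n with
  | zero =>
      have h0 : L = 0 := by omega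
      subst h0; exact le_refl _
  | succ n ih =>
      by_cases hL : L = n + 1
      · subst hL; exact le_refl _
      · have := ih (by omega)
        simp only [pvPc]; split_ifs <;> omega

lemma pvLastF_lt (s : List Char) (c : Char) {n v : Nat} (h : pvLastF s c n = some v) :
    v < n := by
  induction n with
  | zero => simp [pvLastF] at h
  | succ n ih =>
      simp only [pvLastF] at h
      split_ifs at h
      · injection h with h; omega
      · exact Nat.lt_succ_of_lt (ih h)

lemma pvSlF_le_lastF (s : List Char) (c : Char) {n w : Nat} (h : pvSlF s c n = some w) :
    ∃ u, pvLastF s c n = some u ∧ w ≤ u := by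
  induction n with
  | zero => simp [pvSlF] at h
  | succ n ih =>
      simp only [pvSlF, pvLastF] at h ⊢
      split_ifs at h ⊢ with hc
      · exact ⟨n, rfl, Nat.le_of_lt (pvLastF_lt s c h)⟩
      · exact ih h

lemma pvSlF_bound (s : List Char) (c : Char) {n v : Nat} (h : pvSlF s c n = some v) :
    v + 2 ≤ n := by
  induction n with
  | zero => simp [pvSlF] at h
  | succ n ih =>
      simp only [pvSlF] at h
      split_ifs at h
      · have := pvLastF_lt s c h; omega
      · have := ih h; omega

lemma pvLast_char (s : List Char) (c : Char) {L n : Nat} (h : L ≤ n) :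
    pvPc s c L < pvPc s c n ↔ ∃ v, pvLastF s c n = some v ∧ L ≤ v := by
  induction n with
  | zero =>
      have : L = 0 := by omega
      subst this; simp [pvLastF]
  | succ n ih =>
      by_cases hL : L = n + 1
      · subst hL
        constructor
        · omega
        · rintro ⟨v, hv, hLv⟩
          have := pvLastF_lt s c hv; omega
      · have hLn : L ≤ n := by omega
        simp only [pvPc, pvLastF]
        by_cases hc : s.getD n ' ' = c
        · simp only [hc, if_pos rfl, if_true]
          constructor
          · intro _; exact ⟨n, rfl, hLn⟩
          · intro _
            have := pvPc_mono s c hLn; omega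
        · simp only [if_neg hc]
          rw [← ih hLn]; omega

lemma pvSl_char (s : List Char) (c : Char) {L n : Nat} (h : L ≤ n) :
    pvPc s c L + 2 ≤ pvPc s c n ↔ ∃ v, pvSlF s c n = some v ∧ L ≤ v := by
  induction n with
  | zero =>
      have : L = 0 := by omega
      subst this; simp [pvSlF]
  | succ n ih =>
      by_cases hL : L = n + 1
      · subst hL
        constructor
        · omega
        · rintro ⟨v, hv, hLv⟩
          have := pvSlF_bound s c hv; omega
      · have hLn : L ≤ n := by omega
        simp only [pvPc, pvSlF]
        by_cases hc : s.getD n ' ' = c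
        · simp only [hc, if_pos rfl, if_true]
          have := pvLast_char s c hLn
          constructor
          · intro hcount
            exact (pvLast_char s c hLn).mp (by omega)
          · intro hv
            have := (pvLast_char s c hLn).mpr hv; omega
        · simp only [if_neg hc]
          rw [← ih hLn]; omega

lemma pvSlF_mono (s : List Char) (c : Char) {n w : Nat} (h : pvSlF s c n = some w) :
    ∃ w', pvSlF s c (n + 1) = some w' ∧ w ≤ w' := by
  simp only [pvSlF]
  split_ifs with hc
  · obtain ⟨u, hu, hwu⟩ := pvSlF_le_lastF s c h
    exact ⟨u, hu, hwu⟩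
  · exact ⟨w, h, le_refl _⟩

-- characterization of pvMF = some v
lemma pvMF_some_spec (s alpha : List Char) {n v : Nat} (h : pvMF s alpha n = some v) :
    (∃ c ∈ alpha, pvSlF s c n = some v) ∧ (∀ c ∈ alpha, ∃ w, pvSlF s c n = some w ∧ v ≤ w) := by
  unfold pvMF at h
  split_ifs at h with hall
  · have hall' : ∀ c ∈ alpha, ∃ w, pvSlF s c n = some w := by
      intro c hc
      have := (List.all_eq_true.mp hall) c hc
      exact Option.isSome_iff_exists.mp this
    have hmin := List.min?_eq_some_iff.mp h
    obtain ⟨hmem, hle⟩ := hmin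
    obtain ⟨c0, hc0, hv0⟩ := List.mem_map.mp hmem
    obtain ⟨w0, hw0⟩ := hall' c0 hc0
    constructor
    · refine ⟨c0, hc0, ?_⟩
      rw [hw0]; rw [hw0] at hv0; simp at hv0; rw [hv0]
    · intro c hc
      obtain ⟨w, hw⟩ := hall' c hc
      refine ⟨w, hw, ?_⟩
      have : (pvSlF s c n).getD 0 ∈ alpha.map (fun c => (pvSlF s c n).getD 0) :=
        List.mem_map.mpr ⟨c, hc, rfl⟩
      have := hle _ this
      rw [hw] at this; simpa using this

lemma pvMF_some_of (s alpha : List Char) {n : Nat} (hne : alpha ≠ [])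
    (h : ∀ c ∈ alpha, (pvSlF s c n).isSome) : ∃ v, pvMF s alpha n = some v := by
  unfold pvMF
  rw [if_pos (List.all_eq_true.mpr (fun c hc => h c hc))]
  rcases hm : (alpha.map (fun c => (pvSlF s c n).getD 0)).min? with _ | v
  · rw [List.min?_eq_none_iff] at hm
    exact absurd (List.map_eq_nil_iff.mp hm) hne
  · exact ⟨v, rfl⟩

lemma pvMF_none_iff (s alpha : List Char) {n : Nat} (hne : alpha ≠ []) :
    pvMF s alpha n = none ↔ ¬ (∀ c ∈ alpha, (pvSlF s c n).isSome) := by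
  constructor
  · intro h hall
    obtain ⟨v, hv⟩ := pvMF_some_of s alpha hne hall
    rw [h] at hv; cases hv
  · intro hnall
    unfold pvMF
    rw [if_neg (fun hall => hnall (fun c hc => (List.all_eq_true.mp hall) c hc))]

lemma pvMF_bound (s alpha : List Char) {n v : Nat} (h : pvMF s alpha n = some v) :
    v + 2 ≤ n := by
  obtain ⟨⟨c, hc, hsl⟩, _⟩ := pvMF_some_spec s alpha h
  exact pvSlF_bound s c hsl

lemma pvMF_mono (s alpha : List Char) {n v : Nat} (hne : alpha ≠ [])
    (h : pvMF s alpha n = some v) :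
    ∃ v', pvMF s alpha (n + 1) = some v' ∧ v ≤ v' := by
  obtain ⟨⟨c0, hc0, hv0⟩, hall⟩ := pvMF_some_spec s alpha h
  have hall' : ∀ c ∈ alpha, (pvSlF s c (n + 1)).isSome := by
    intro c hc
    obtain ⟨w, hw, _⟩ := hall c hc
    obtain ⟨w', hw', _⟩ := pvSlF_mono s c hw
    rw [hw']; rfl
  obtain ⟨v', hv'⟩ := pvMF_some_of s alpha hne hall'
  refine ⟨v', hv', ?_⟩
  obtain ⟨⟨c1, hc1, hv1⟩, _⟩ := pvMF_some_spec s alpha hv'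
  obtain ⟨w1, hw1, hvw1⟩ := hall c1 hc1
  obtain ⟨w1', hw1', hle1⟩ := pvSlF_mono s c1 hw1
  rw [hv1] at hw1'
  injection hw1' with hw1'
  omega

-- completeness of the window [L, n) ↔ L ≤ pvMF n
lemma pvComplete_iff (s alpha : List Char) {L n : Nat} (hne : alpha ≠ []) (h : L ≤ n) :
    (∀ c ∈ alpha, pvPc s c L + 2 ≤ pvPc s c n) ↔ ∃ v, pvMF s alpha n = some v ∧ L ≤ v := by
  constructor
  · intro hall
    have hsome : ∀ c ∈ alpha, (pvSlF s c n).isSome := by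
      intro c hc
      obtain ⟨w, hw, _⟩ := (pvSl_char s c h).mp (hall c hc)
      rw [hw]; rfl
    obtain ⟨v, hv⟩ := pvMF_some_of s alpha hne hsome
    refine ⟨v, hv, ?_⟩
    obtain ⟨⟨c0, hc0, hv0⟩, _⟩ := pvMF_some_spec s alpha hv
    obtain ⟨w, hw, hLw⟩ := (pvSl_char s c0 h).mp (hall c0 hc0)
    rw [hv0] at hw; injection hw with hw; omega
  · rintro ⟨v, hv, hLv⟩ c hc
    obtain ⟨_, hall⟩ := pvMF_some_spec s alpha hv
    obtain ⟨w, hw, hvw⟩ := hall c hc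
    exact (pvSl_char s c h).mpr ⟨w, hw, by omega⟩

lemma pvMF_zero (s alpha : List Char) (hne : alpha ≠ []) : pvMF s alpha 0 = none := by
  rw [pvMF_none_iff s alpha hne]
  intro hall
  obtain ⟨c, hc⟩ := List.exists_mem_of_ne_nil alpha hne
  have := hall c hc
  simp [pvSlF] at this

lemma pvBestF_none (s alpha : List Char) {n : Nat} (hne : alpha ≠ [])
    (h : pvMF s alpha n = none) : pvBestF s alpha n = none := by
  induction n with
  | zero => rfl
  | succ n ih =>
      have hn : pvMF s alpha n = none := by
        rcases hm : pvMF s alpha n with _ | v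
        · rfl
        · obtain ⟨v', hv', _⟩ := pvMF_mono s alpha hne hm
          rw [hv'] at h; cases h
      simp only [pvBestF, h, hn]
      exact ih hn

lemma pvBestF_bound (s alpha : List Char) {n v : Nat} (hne : alpha ≠ [])
    (h : pvMF s alpha n = some v) : ∃ b, pvBestF s alpha n = some b ∧ b ≤ n - v := by
  induction n generalizing v with
  | zero => rw [pvMF_zero s alpha hne] at h; cases h
  | succ n ih =>
      have hb := pvMF_bound s alpha h
      simp only [pvBestF, h]
      rcases hm : pvMF s alpha n with _ | v0
      · rw [pvBestF_none s alpha hne hm]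
        exact ⟨n - v + 1, rfl, by omega⟩
      · obtain ⟨b0, hb0, hble⟩ := ih hm
        obtain ⟨v', hv', hvv'⟩ := pvMF_mono s alpha hne hm
        rw [h] at hv'; injection hv' with hv'; subst hv'
        rw [hb0]
        exact ⟨min b0 (n - v + 1), rfl, by omega⟩

-- generic counting lemma: countP after changing the predicate at one key
lemma pvCnt2_update {alpha : List Char} (hnd : alpha.Nodup) {k : Char} (hk : k ∈ alpha)
    (p q : Char → Bool) (hpq : ∀ c ∈ alpha, c ≠ k → q c = p c) :
    (alpha.countP q : Int) =
      (alpha.countP p : Int) + (if q k then 1 else 0) - (if p k then 1 else 0) := by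
  induction alpha with
  | nil => cases hk
  | cons a l ih =>
      rcases List.nodup_cons.mp hnd with ⟨hal, hl⟩
      rcases List.mem_cons.mp hk with h | h
      · subst h
        have hcong : l.countP q = l.countP p := by
          apply List.countP_congr
          intro c hc
          rw [hpq c (List.mem_cons_of_mem _ hc) (fun e => hal (e ▸ hc))]
        rw [List.countP_cons, List.countP_cons, hcong]
        by_cases hq : q k <;> by_cases hp : p k <;>
          simp only [hq, hp, if_true] <;> push_cast <;> omega
      · have hak : a ≠ k := fun e => hal (e ▸ h)
        have hIH := ih hl h (fun c hc hck => hpq c (List.mem_cons_of_mem _ hc) hck)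
        have haq : q a = p a := hpq a (List.mem_cons_self ..) hak
        rw [List.countP_cons, List.countP_cons, haq]
        by_cases hpa : p a <;> by_cases hqk : q k <;> by_cases hpk : p k <;>
          simp only [hpa, hqk, hpk, if_true] at hIH ⊢ <;> push_cast at hIH ⊢ <;> omega

-- A-side loop invariant after processing the first p characters
def pvAInv (s alpha : List Char) (p : Nat) (st : PySem.Dict Char Int × Nat × Option Nat) : Prop :=
  st.2.1 ≤ p ∧
  (∀ c ∈ alpha, st.1.getD c 0 = (pvPc s c p : Int) - pvPc s c st.2.1) ∧
  st.2.1 = (match pvMF s alpha p with | none => 0 | some v => v + 1) ∧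
  st.2.2 = pvBestF s alpha p

lemma pvAShrink_spec (s alpha : List Char) (hne : alpha ≠ []) (hnd : alpha.Nodup)
    (right : Nat) :
    ∀ (fuel left : Nat) (cc : PySem.Dict Char Int) (ml : Option Nat),
      right + 1 - left = fuel → left ≤ right + 1 →
      (∀ c ∈ alpha, cc.getD c 0 = (pvPc s c (right + 1) : Int) - pvPc s c left) →
      ((pvMF s alpha (right + 1) = none →
          pvAShrink s alpha right cc
            ((alpha.countP (fun c => decide (2 ≤ cc.getD c 0)) : Int)) left ml = (cc, left, ml)) ∧
       (∀ v, pvMF s alpha (right + 1) = some v → v < left →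
          pvAShrink s alpha right cc
            ((alpha.countP (fun c => decide (2 ≤ cc.getD c 0)) : Int)) left ml = (cc, left, ml)) ∧
       (∀ v, pvMF s alpha (right + 1) = some v → left ≤ v →
          (pvAShrink s alpha right cc
            ((alpha.countP (fun c => decide (2 ≤ cc.getD c 0)) : Int)) left ml).2.1 = v + 1 ∧
          (∀ c ∈ alpha, (pvAShrink s alpha right cc
            ((alpha.countP (fun c => decide (2 ≤ cc.getD c 0)) : Int)) left ml).1.getD c 0 =
              (pvPc s c (right + 1) : Int) - pvPc s c (v + 1)) ∧
          (pvAShrink s alpha right cc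
            ((alpha.countP (fun c => decide (2 ≤ cc.getD c 0)) : Int)) left ml).2.2 =
            some (match ml with
                  | none => right - v + 1
                  | some b => min b (right - v + 1)))) := by
  intro fuel
  induction fuel with
  | zero =>
      intro left cc ml hfuel hle hcc
      have hlr : ¬ left ≤ right := by omega
      refine ⟨fun _ => ?_, fun v _ _ => ?_, fun v hm hlv => ?_⟩
      · rw [pvAShrink.eq_def, dif_neg hlr]
      · rw [pvAShrink.eq_def, dif_neg hlr]
      · have hb := pvMF_bound s alpha hm
        omega
  | succ f ih =>
      intro left cc ml hfuel hle hcc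
      by_cases hlr : left ≤ right
      · -- completeness of the current window ↔ cu = size
        have hcompl : (∀ c ∈ alpha, pvPc s c left + 2 ≤ pvPc s c (right + 1)) ↔
            ((alpha.countP (fun c => decide (2 ≤ cc.getD c 0)) : Int) = (alpha.length : Int)) := by
          rw [Int.ofNat_inj, List.countP_eq_length]
          constructor
          · intro hall c hc
            have := hall c hc
            have hcg := hcc c hc
            simp only [decide_eq_true_eq]
            omega
          · intro hall c hc
            have := hall c hc
            simp only [decide_eq_true_eq] at this
            have hcg := hcc c hc
            omega
        refine ⟨fun hm => ?_, fun v hm hvl => ?_, fun v hm hlv => ?_⟩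
        · have hnc : ¬ ((alpha.countP (fun c => decide (2 ≤ cc.getD c 0)) : Int) = (alpha.length : Int)) := by
            intro hcu
            obtain ⟨v, hv, _⟩ := (pvComplete_iff s alpha hne (by omega)).mp (hcompl.mpr hcu)
            rw [hm] at hv; cases hv
          rw [pvAShrink.eq_def, dif_pos hlr, if_neg hnc]
        · have hnc : ¬ ((alpha.countP (fun c => decide (2 ≤ cc.getD c 0)) : Int) = (alpha.length : Int)) := by
            intro hcu
            obtain ⟨v', hv', hlv'⟩ := (pvComplete_iff s alpha hne (by omega)).mp (hcompl.mpr hcu)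
            rw [hm] at hv'
            injection hv' with hv'
            omega
          rw [pvAShrink.eq_def, dif_pos hlr, if_neg hnc]
        · have hb := pvMF_bound s alpha hm
          have hcu : (alpha.countP (fun c => decide (2 ≤ cc.getD c 0)) : Int) = (alpha.length : Int) :=
            hcompl.mp ((pvComplete_iff s alpha hne (by omega)).mpr ⟨v, hm, hlv⟩)
          have hall2 : ∀ c ∈ alpha, 2 ≤ cc.getD c 0 := by
            intro c hc
            have := hcompl.mpr hcu
            have hcg := hcc c hc
            have := this c hc
            omega
          have hmeet : alpha.all (fun c => 2 ≤ cc.getD c 0) = true := by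
            simp only [List.all_eq_true, decide_eq_true_eq]
            exact hall2
          rw [pvAShrink.eq_def, dif_pos hlr, if_pos hcu]
          simp only [hmeet, if_true]
          set lc := s.getD left ' ' with hlc
          set cc' := cc.modify lc 0 (· - 1) with hcc'def
          set ml' := some (match ml with
                           | none => right - left + 1
                           | some m => min m (right - left + 1)) with hml'
          -- the decremented dict counts the window [left+1, right+1)
          have hcc' : ∀ c ∈ alpha, cc'.getD c 0 = (pvPc s c (right + 1) : Int) - pvPc s c (left + 1) := by
            intro c hc
            have hstep : pvPc s c (left + 1) = pvPc s c left + (if s.getD left ' ' = c then 1 else 0) := rfl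
            rw [hcc'def, PySem.Dict.getD_modify]
            by_cases hclc : c = lc
            · have hsc : s.getD left ' ' = c := by rw [hclc, hlc]
              rw [if_pos hclc, ← hclc, hcc c hc, hstep, if_pos hsc]
              push_cast; ring
            · have hsc : ¬ (s.getD left ' ' = c) := fun e => hclc (by rw [← e, hlc])
              rw [if_neg hclc, hcc c hc, hstep, if_neg hsc]
              push_cast; ring
          -- the updated cu is the recount over the decremented dict
          have hcu' : (if cc'.getD lc 0 < 2 ∧ PySem.Set.contains alpha lc then
                (alpha.countP (fun c => decide (2 ≤ cc.getD c 0)) : Int) - 1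
              else (alpha.countP (fun c => decide (2 ≤ cc.getD c 0)) : Int)) =
              (alpha.countP (fun c => decide (2 ≤ cc'.getD c 0)) : Int) := by
            by_cases hin : lc ∈ alpha
            · have hcont : PySem.Set.contains alpha lc = true := (PySem.Set.contains_iff _ _).mpr hin
              have hupd := pvCnt2_update hnd hin (fun c => decide (2 ≤ cc.getD c 0))
                (fun c => decide (2 ≤ cc'.getD c 0))
                (fun c _ hck => by
                  rw [hcc'def]
                  simp [PySem.Dict.getD_modify, hck])
              have hgm : cc'.getD lc 0 = cc.getD lc 0 - 1 := by
                rw [hcc'def, PySem.Dict.getD_modify_self]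
              have hp : decide ((2:Int) ≤ cc.getD lc 0) = true := by
                simp only [decide_eq_true_eq]; exact hall2 lc hin
              rw [hupd]
              simp only [hp, hgm, hcont, and_true, decide_eq_true_eq]
              split_ifs <;> omega
            · have hcont : PySem.Set.contains alpha lc = false := by
                rw [← Bool.not_eq_true, PySem.Set.contains_iff]; exact hin
              rw [if_neg (by simp only [hcont]; exact fun h => Bool.false_ne_true h.2)]
              congr 1
              apply List.countP_congr
              intro c hc
              have : c ≠ lc := fun e => hin (e ▸ hc)
              rw [hcc'def]
              simp [PySem.Dict.getD_modify, this]
          rw [hcu']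
          have hIH := ih (left + 1) cc' ml' (by omega) (by omega) hcc'
          by_cases hlv2 : left + 1 ≤ v
          · obtain ⟨h1, h2, h3⟩ := (hIH.2.2) v hm hlv2
            refine ⟨h1, h2, ?_⟩
            rw [h3, hml']
            cases ml with
            | none =>
                simp only []
                congr 1
                omega
            | some m =>
                simp only []
                congr 1
                omega
          · have hlev : left = v := by omega
            have hIH2 := (hIH.2.1) v hm (by omega)
            rw [hIH2]
            subst hlev
            exact ⟨rfl, hcc', by rw [hml']⟩
      · have hleq : left = right + 1 := by omega
        refine ⟨fun _ => ?_, fun v _ _ => ?_, fun v hm hlv => ?_⟩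
        · rw [pvAShrink.eq_def, dif_neg hlr]
        · rw [pvAShrink.eq_def, dif_neg hlr]
        · have hb := pvMF_bound s alpha hm
          omega

lemma pvAStep_inv (s alpha : List Char) (hne : alpha ≠ []) (hnd : alpha.Nodup) (p : Nat)
    (st : PySem.Dict Char Int × Nat × Option Nat) (h : pvAInv s alpha p st) :
    pvAInv s alpha (p + 1) (pvAStep s alpha st p) := by
  obtain ⟨cc, left, ml⟩ := st
  obtain ⟨hle, hcc, hleft, hml⟩ := h
  simp only [] at hle hcc hleft hml
  unfold pvAStep
  simp only []
  set ch := s.getD p ' ' with hch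
  set cc1 := cc.modify ch 0 (· + 1) with hcc1def
  -- the incremented dict counts the window [left, p+1)
  have hcc1 : ∀ c ∈ alpha, cc1.getD c 0 = (pvPc s c (p + 1) : Int) - pvPc s c left := by
    intro c hc
    have hstep : pvPc s c (p + 1) = pvPc s c p + (if s.getD p ' ' = c then 1 else 0) := rfl
    rw [hcc1def, PySem.Dict.getD_modify]
    by_cases hclc : c = ch
    · have hsc : s.getD p ' ' = c := by rw [hclc, hch]
      rw [if_pos hclc, ← hclc, hcc c hc, hstep, if_pos hsc]
      push_cast; ring
    · have hsc : ¬ (s.getD p ' ' = c) := fun e => hclc (by rw [← e, hch])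
      rw [if_neg hclc, hcc c hc, hstep, if_neg hsc]
      push_cast; ring
  -- the alphabet rescan is the countP of the incremented dict
  have hfold : alpha.foldl (fun acc c => if 2 ≤ cc1.getD c 0 then acc + 1 else acc) (0 : Int) =
      (alpha.countP (fun c => decide (2 ≤ cc1.getD c 0)) : Int) := by
    rw [PySem.List.foldl_ite_add_one]
    simp
  rw [hfold]
  have hspec := pvAShrink_spec s alpha hne hnd p (p + 1 - left) left cc1 ml rfl (by omega) hcc1
  rcases hm : pvMF s alpha (p + 1) with _ | v
  · -- still incomplete: nothing happens
    have hmp : pvMF s alpha p = none := by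
      rcases hmp : pvMF s alpha p with _ | v0
      · rfl
      · obtain ⟨v', hv', _⟩ := pvMF_mono s alpha hne hmp
        rw [hm] at hv'; cases hv'
    rw [hspec.1 hm]
    refine ⟨show left ≤ p + 1 by omega, hcc1, ?_, ?_⟩
    · show left = (match pvMF s alpha (p + 1) with | none => 0 | some v => v + 1)
      simp only [hm, hleft, hmp]
    · show ml = pvBestF s alpha (p + 1)
      simp only [pvBestF, hm, hml]
  · have hb := pvMF_bound s alpha hm
    rcases hmp : pvMF s alpha p with _ | v0
    · -- first completion: left = 0 ≤ v
      have hl0 : left = 0 := by simp only [hleft, hmp]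
      obtain ⟨h1, h2, h3⟩ := hspec.2.2 v hm (by omega)
      have hmlnone : ml = none := by rw [hml, pvBestF_none s alpha hne hmp]
      unfold pvAInv
      rw [h1, h3, hm]
      refine ⟨by omega, h2, rfl, ?_⟩
      simp only [pvBestF, hm, hmlnone, pvBestF_none s alpha hne hmp]
    · have hlv0 : left = v0 + 1 := by simp only [hleft, hmp]
      obtain ⟨v', hv', hv0v⟩ := pvMF_mono s alpha hne hmp
      rw [hm] at hv'
      injection hv' with hv'
      subst hv'
      obtain ⟨b0, hb0, hble⟩ := pvBestF_bound s alpha hne hmp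
      have hmlb : ml = some b0 := by rw [hml, hb0]
      by_cases hvlt : v0 < v
      · -- the minimum moved right: the window shrinks and records
        obtain ⟨h1, h2, h3⟩ := hspec.2.2 v hm (by omega)
        unfold pvAInv
        rw [h1, h3, hm]
        refine ⟨by omega, h2, rfl, ?_⟩
        simp only [pvBestF, hm, hmlb, hb0]
      · -- the minimum did not move: no new record, old best already ≤ the new length
        have hveq : v = v0 := by omega
        subst hveq
        rw [hspec.2.1 v hm (by omega)]
        refine ⟨show left ≤ p + 1 by omega, hcc1, ?_, ?_⟩
        · show left = (match pvMF s alpha (p + 1) with | none => 0 | some w => w + 1)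
          rw [hm]; exact hlv0
        · show ml = pvBestF s alpha (p + 1)
          rw [hmlb]
          simp only [pvBestF, hm, hb0]
          congr 1
          omega

-- B-side loop invariant after processing the first p characters
def pvBInv (s alpha : List Char) (p : Nat)
    (st : PySem.Dict Char Int × PySem.Dict Char Int × Option Int) : Prop :=
  (∀ c ∈ alpha, st.1.get? c = (pvLastF s c p).map (fun v : Nat => (v : Int))) ∧
  (∀ c ∈ alpha, st.2.1.get? c = (pvSlF s c p).map (fun v : Nat => (v : Int))) ∧
  st.2.2 = (pvBestF s alpha p).map (fun b : Nat => (b : Int))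

lemma pvBStep_inv (s alpha : List Char) (hne : alpha ≠ []) (p : Nat)
    (st : PySem.Dict Char Int × PySem.Dict Char Int × Option Int) (h : pvBInv s alpha p st) :
    pvBInv s alpha (p + 1) (pvBStep alpha st ((p : Int), s.getD p ' ')) := by
  obtain ⟨last, sl, best⟩ := st
  obtain ⟨hlast, hsl, hbest⟩ := h
  simp only [] at hlast hsl hbest
  unfold pvBStep
  simp only []
  set ch := s.getD p ' ' with hch
  set ls := (if PySem.Set.contains alpha ch then
              (last.insert ch (p : Int),
               match last.get? ch with
               | some v => sl.insert ch v
               | none => sl)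
            else (last, sl)) with hdef
  -- one ghost step, phrased with the abbreviation ch
  have hgl : ∀ c, pvLastF s c (p + 1) = if ch = c then some p else pvLastF s c p := by
    intro c
    rw [hch]
    rfl
  have hgs : ∀ c, pvSlF s c (p + 1) = if ch = c then pvLastF s c p else pvSlF s c p := by
    intro c
    rw [hch]
    rfl
  -- the updated dicts track the ghost occurrence indices
  have hls : (∀ c ∈ alpha, ls.1.get? c = (pvLastF s c (p + 1)).map (fun v : Nat => (v : Int))) ∧
      (∀ c ∈ alpha, ls.2.get? c = (pvSlF s c (p + 1)).map (fun v : Nat => (v : Int))) := by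
    by_cases hin : ch ∈ alpha
    · rw [if_pos ((PySem.Set.contains_iff _ _).mpr hin)] at hdef
      constructor
      · intro c hc
        rw [hdef]
        simp only []
        rw [PySem.Dict.get?_insert, hgl c]
        by_cases hcch : c = ch
        · rw [if_pos hcch, if_pos hcch.symm]
          rfl
        · rw [if_neg hcch, if_neg (fun e => hcch e.symm)]
          exact hlast c hc
      · intro c hc
        rw [hdef]
        simp only [hlast ch hin]
        rw [hgs c]
        by_cases hcch : c = ch
        · rw [hcch, if_pos rfl]
          rcases hlf : pvLastF s ch p with _ | u
          · simp only [hlf, Option.map_none]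
            have hslf : pvSlF s ch p = none := by
              rcases hsf : pvSlF s ch p with _ | w
              · rfl
              · obtain ⟨u', hu', _⟩ := pvSlF_le_lastF s ch hsf
                rw [hlf] at hu'; cases hu'
            rw [hsl ch hin, hslf]
            rfl
          · simp only [Option.map_some]
            rw [PySem.Dict.get?_insert_self]
        · rw [if_neg (fun e => hcch e.symm)]
          rcases hlf : pvLastF s ch p with _ | u
          · simp only [hlf, Option.map_none]
            exact hsl c hc
          · simp only [hlf, Option.map_some]
            rw [PySem.Dict.get?_insert, if_neg hcch]
            exact hsl c hc
    · rw [if_neg (fun h => hin ((PySem.Set.contains_iff _ _).mp h))] at hdef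
      rw [hdef]
      have hchc : ∀ c ∈ alpha, ¬ (ch = c) := fun c hc e => hin (e ▸ hc)
      exact ⟨fun c hc => by rw [hgl c, if_neg (hchc c hc)]; exact hlast c hc,
             fun c hc => by rw [hgs c, if_neg (hchc c hc)]; exact hsl c hc⟩
  obtain ⟨hlast', hsl'⟩ := hls
  refine ⟨hlast', hsl', ?_⟩
  -- the best update matches the ghost pvBestF step
  by_cases hall : ∀ c ∈ alpha, (pvSlF s c (p + 1)).isSome
  · obtain ⟨v, hv⟩ := pvMF_some_of s alpha hne hall
    have hcond : (alpha.all fun c => (ls.2.get? c).isSome) = true := by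
      rw [List.all_eq_true]
      intro c hc
      rw [hsl' c hc, Option.isSome_map]
      exact hall c hc
    rw [hcond, if_pos rfl]
    -- the computed min is the ghost minimum
    have hminIff := hv
    unfold pvMF at hminIff
    rw [if_pos (List.all_eq_true.mpr (fun c hc => hall c hc))] at hminIff
    have hbnd := pvMF_bound s alpha hv
    have hmap : (alpha.map (fun c => ls.2.getD c 0)) =
        (alpha.map (fun c => (pvSlF s c (p + 1)).getD 0)).map (fun v : Nat => (v : Int)) := by
      rw [List.map_map]
      apply List.map_congr_left
      intro c hc
      simp only [Function.comp]
      rw [PySem.Dict.getD_eq_get?_getD, hsl' c hc]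
      rcases pvSlF s c (p + 1) with _ | w <;> simp
    have hmin : PySem.List.min? ((alpha.map (fun c => (pvSlF s c (p + 1)).getD 0)).map
        (fun v : Nat => (v : Int))) (fun x => x) = some ((v : Int)) := by
      set l := alpha.map (fun c => (pvSlF s c (p + 1)).getD 0) with hl
      obtain ⟨hvmem, hvle⟩ := List.min?_eq_some_iff.mp hminIff
      rcases hpm : PySem.List.min? (l.map (fun v : Nat => (v : Int))) (fun x => x) with _ | m
      · rw [PySem.List.min?_eq_none_iff] at hpm
        rw [List.map_eq_nil_iff] at hpm
        rw [hpm] at hvmem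
        cases hvmem
      · have hmmem := PySem.List.min?_mem hpm
        have hmle := PySem.List.min?_isMin hpm
        obtain ⟨u, hu, hum⟩ := List.mem_map.mp hmmem
        have h1 : m ≤ (v : Int) := hmle _ (List.mem_map.mpr ⟨v, hvmem, rfl⟩)
        have h2 : (v : Int) ≤ m := by
          rw [← hum]
          exact_mod_cast hvle u hu
        rw [le_antisymm h1 h2]
    rw [hmap, hmin]
    simp only [Option.getD_some]
    rw [hbest]
    simp only [pvBestF, hv]
    rcases pvBestF s alpha p with _ | b
    · simp only [Option.map_none, Option.map_some, Option.some.injEq]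
      push_cast
      omega
    · simp only [Option.map_some]
      split_ifs with hlt
      · simp only [Option.some.injEq]
        push_cast at hlt ⊢
        omega
      · simp only [Option.some.injEq]
        push_cast at hlt ⊢
        omega
  · have hm : pvMF s alpha (p + 1) = none := (pvMF_none_iff s alpha hne).mpr hall
    have hcond : (alpha.all fun c => (ls.2.get? c).isSome) = false := by
      rcases not_forall.mp hall with ⟨c, hcna⟩
      have hc : c ∈ alpha := by
        by_contra hnc
        exact hcna (fun h => absurd h hnc)
      have hna : ¬ (pvSlF s c (p + 1)).isSome := fun hs => hcna (fun _ => hs)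
      apply Bool.eq_false_iff.mpr
      intro htrue
      apply hna
      have := List.all_eq_true.mp htrue c hc
      rwa [hsl' c hc, Option.isSome_map] at this
    rw [hcond]
    simp only [Bool.false_eq_true, if_false]
    rw [hbest]
    simp only [pvBestF, hm]

lemma pvAlphabet_nodup (custom_a : Option String) : (pvAlphabet custom_a).Nodup := by
  unfold pvAlphabet
  cases custom_a with
  | none => exact PySem.Set.nodup_ofList _
  | some ca =>
      by_cases h : ca.toList = [] <;> simp [h]

lemma pvAlphabet_ne_nil (custom_a : Option String) : pvAlphabet custom_a ≠ [] := by
  unfold pvAlphabet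
  cases custom_a with
  | none => decide
  | some ca =>
      show (if ca.toList ≠ [] then PySem.Set.ofList ca.toList
            else PySem.Set.ofList "abcdefghijklmnopqrstuvwxyz".toList) ≠ []
      split_ifs with h
      · rcases hl : ca.toList with _ | ⟨c, rest⟩
        · exact absurd hl h
        · rw [PySem.Set.ofList_cons]; simp
      · decide

lemma pvA_loop (s alpha : List Char) (hne : alpha ≠ []) (hnd : alpha.Nodup) (n : Nat) :
    pvAInv s alpha n ((List.range n).foldl (pvAStep s alpha) (PySem.Dict.empty, 0, none)) := by
  induction n with
  | zero =>
      refine ⟨Nat.le_refl _, fun c _ => by simp [PySem.Dict.getD_empty, pvPc], ?_, rfl⟩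
      simp [pvMF_zero s alpha hne]
  | succ n ih =>
      rw [List.range_succ, List.foldl_append, List.foldl_cons, List.foldl_nil]
      exact pvAStep_inv s alpha hne hnd n _ ih

lemma pvB_loop (s alpha : List Char) (hne : alpha ≠ []) (n : Nat) (hn : n ≤ s.length) :
    pvBInv s alpha n ((PySem.List.enumerate (s.take n) 0).foldl (pvBStep alpha)
      (PySem.Dict.empty, PySem.Dict.empty, none)) := by
  induction n with
  | zero =>
      simp only [List.take_zero, PySem.List.enumerate_nil, List.foldl_nil]
      refine ⟨fun c _ => ?_, fun c _ => ?_, rfl⟩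
      · rw [PySem.Dict.get?_empty]; rfl
      · rw [PySem.Dict.get?_empty]; rfl
  | succ n ih =>
      have hlt : n < s.length := by omega
      have htake : s.take (n + 1) = s.take n ++ [s[n]] := by
        rw [List.take_add_one, List.getElem?_eq_getElem hlt]
        rfl
      have hlen : (s.take n).length = n := List.length_take_of_le (by omega)
      rw [htake, PySem.List.enumerate_append, hlen, List.foldl_append]
      rw [PySem.List.enumerate_cons, PySem.List.enumerate_nil, List.foldl_cons, List.foldl_nil]
      have harg : ((0 : Int) + (n : Nat), s[n]) = ((n : Int), s.getD n ' ') := by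
        rw [zero_add, List.getD_eq_getElem _ _ hlt]
      rw [harg]
      exact pvBStep_inv s alpha hne n _ (ih (by omega))

-- ===== VERDICT (by name: the statement is the Claim_ definition above) =====
theorem full_alphabet_len_spec : Claim_equal_full_alphabet_len := by
  intro text ic ca _
  unfold Spec_full_alphabet_len full_alphabet_len full_alphabet_len_alt
  set alpha := pvAlphabet ca with halpha
  set s := pvClean ic text.toList with hs
  by_cases h : s = []
  · simp [h]
  · simp only [h, if_false]
    have hne := pvAlphabet_ne_nil ca
    have hnd := pvAlphabet_nodup ca
    have hA := pvA_loop s alpha hne hnd s.length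
    have hB := pvB_loop s alpha hne s.length (le_refl _)
    rw [List.take_length] at hB
    rw [hA.2.2.2, hB.2.2]
    rcases pvBestF s alpha s.length with _ | b <;> simp
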